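-- pv_equiv track=rewrite | github.com/wilsonwcyiu/220402_cell_tracking | experiment/experiment.py | get_FIT_and_FIO
-- ===== SOURCE A (Python) =====
-- def get_FIT_and_FIO(total_frame_num, gt_idmap_tuple_list, prediction_idmap_list):
--     #find the FIT and FIO errors per frame
--     FF_list = []
--     for frame_num in range(total_frame_num):
--         gt_in_frame = 0
--         FIT = 0
--         #Count the FITs in this frame
--         for gt_track_list, prediction_list in gt_idmap_tuple_list:
--             #get the gt cell number in this frame
--             curr_gt_cell = [ i[0] for i in gt_track_list if i[1] == frame_num]  # frame
--             # if a ground truth track is present in this frame,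
--             # check if prediction_list is the same, otherwise count FIT
--             if curr_gt_cell:
--                 gt_in_frame += 1
--                 curr_est_cells = [ i[0] for i in prediction_list if i[1] == frame_num]
--                 if curr_est_cells:
--                     for curr_est_cell in curr_est_cells:
--                         if not int(curr_est_cell) == int(curr_gt_cell[0]):
--                             FIT = FIT + 1
--
--         FIO = 0
--         #count the FIOs in this frame
--         for prediction_list, gt_track_list in prediction_idmap_list:
--             #get the prediction_list cell numbers in this frame
--             curr_est_cells = [ i[0] for i in prediction_list if i[1] == frame_num]
--             # if the ground truth track is present in this frame,
--             # check if prediction_list is the same, otherwise count FIO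
--             curr_gt_cell = [ i[0] for i in gt_track_list if i[1] == frame_num]
--             if curr_gt_cell:
--                 if curr_est_cells:
--                     for curr_est_cell in curr_est_cells:
--                         if not int(curr_est_cell) == int(curr_gt_cell[0]):
--                             FIO = FIO + 1
--
--         if gt_in_frame > 0:
--             FF_list.append((FIT, FIO, gt_in_frame))
--
--     return FF_list
-- ===== SOURCE B (Python) =====
-- def _bucket_counts(tuple_list, total_frame_num):
--     # one pass over the entries: bucket per frame instead of re-scanning per frame
--     present = {}   # frame -> number of tracks whose ground truth appears in that frame
--     mismatch = {}  # frame -> number of predicted ids differing from that track's gt id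
--     for gt_track_list, prediction_list in tuple_list:
--         first = {}  # frame -> first gt cell id listed for that frame
--         for cell, frame in gt_track_list:
--             if 0 <= frame < total_frame_num and frame not in first:
--                 first[frame] = cell
--         for frame in first:
--             present[frame] = present.get(frame, 0) + 1
--         for cell, frame in prediction_list:
--             g = first.get(frame)
--             if g is not None and cell != g:
--                 mismatch[frame] = mismatch.get(frame, 0) + 1
--     return present, mismatch
--
--
-- def get_FIT_and_FIO(total_frame_num, gt_idmap_tuple_list, prediction_idmap_list):
--     gt_in, fit = _bucket_counts(gt_idmap_tuple_list, total_frame_num)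
--     _, fio = _bucket_counts([(g, p) for p, g in prediction_idmap_list], total_frame_num)
--     return [(fit.get(f, 0), fio.get(f, 0), gt_in[f]) for f in sorted(gt_in)]
-- ===== Notes on version B (the rewrite author's own statement) =====
-- stated objective: faster
-- what changed: Instead of re-scanning every track's entries for each of the total_frame_num frames, B buckets each track's entries by frame in a single pass (first-gt-id and mismatch counters keyed by frame) and emits the sorted frame keys, so the cost no longer depends on total_frame_num times the entry count.
import Mathlib
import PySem

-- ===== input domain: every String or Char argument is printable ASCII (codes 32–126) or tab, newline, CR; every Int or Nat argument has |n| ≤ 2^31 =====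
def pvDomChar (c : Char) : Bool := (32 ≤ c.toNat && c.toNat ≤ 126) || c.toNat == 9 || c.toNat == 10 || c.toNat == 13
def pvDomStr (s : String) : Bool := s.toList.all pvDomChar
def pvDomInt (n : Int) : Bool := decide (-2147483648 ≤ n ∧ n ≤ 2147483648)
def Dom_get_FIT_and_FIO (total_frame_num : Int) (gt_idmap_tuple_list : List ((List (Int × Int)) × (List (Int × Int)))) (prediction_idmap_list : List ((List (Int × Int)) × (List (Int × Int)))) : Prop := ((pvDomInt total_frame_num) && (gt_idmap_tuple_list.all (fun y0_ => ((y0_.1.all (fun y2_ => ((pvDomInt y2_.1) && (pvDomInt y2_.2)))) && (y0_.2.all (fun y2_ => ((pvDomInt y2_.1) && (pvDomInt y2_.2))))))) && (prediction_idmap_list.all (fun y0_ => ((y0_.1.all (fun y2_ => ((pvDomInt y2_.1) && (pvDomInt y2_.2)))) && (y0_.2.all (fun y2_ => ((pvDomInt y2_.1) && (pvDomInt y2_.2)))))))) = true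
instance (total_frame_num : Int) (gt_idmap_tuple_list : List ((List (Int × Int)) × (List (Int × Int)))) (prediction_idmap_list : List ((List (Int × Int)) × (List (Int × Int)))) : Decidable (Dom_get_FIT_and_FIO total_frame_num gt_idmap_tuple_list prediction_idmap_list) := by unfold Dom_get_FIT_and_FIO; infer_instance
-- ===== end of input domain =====

-- ===== PORT A =====
-- B buckets entries by frame in one pass instead of rescanning all entries per frame (faster asymptotically).
def get_FIT_and_FIO (total_frame_num : Int) (gt_idmap_tuple_list : List ((List (Int × Int)) × (List (Int × Int)))) (prediction_idmap_list : List ((List (Int × Int)) × (List (Int × Int)))) : List (Int × Int × Int) :=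
  (PySem.List.pyRange 0 total_frame_num 1).foldl (fun FF_list frame_num =>
    let gf : Int × Int := gt_idmap_tuple_list.foldl (fun (acc : Int × Int) t =>
      let curr_gt_cell := (t.1.filter (fun i => i.2 == frame_num)).map (fun i => i.1)
      if curr_gt_cell ≠ [] then
        let gt_in_frame := acc.1 + 1
        let curr_est_cells := (t.2.filter (fun i => i.2 == frame_num)).map (fun i => i.1)
        if curr_est_cells ≠ [] then
          (gt_in_frame, curr_est_cells.foldl (fun FIT c => if ¬ (c = curr_gt_cell.headI) then FIT + 1 else FIT) acc.2)
        else (gt_in_frame, acc.2)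
      else acc) (0, 0)
    let FIO : Int := prediction_idmap_list.foldl (fun FIO t =>
      let curr_est_cells := (t.1.filter (fun i => i.2 == frame_num)).map (fun i => i.1)
      let curr_gt_cell := (t.2.filter (fun i => i.2 == frame_num)).map (fun i => i.1)
      if curr_gt_cell ≠ [] then
        if curr_est_cells ≠ [] then
          curr_est_cells.foldl (fun FIO c => if ¬ (c = curr_gt_cell.headI) then FIO + 1 else FIO) FIO
        else FIO
      else FIO) 0
    if gf.1 > 0 then FF_list ++ [(gf.2, FIO, gf.1)] else FF_list) []

-- ===== PORT B =====
-- helper of B: one pass over the tuples; per frame: how many tracks have a gt entry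
-- and how many prediction entries disagree with that track's first gt id.
def pvBucketCounts (tuple_list : List ((List (Int × Int)) × (List (Int × Int)))) (total_frame_num : Int) :
    PySem.Dict Int Int × PySem.Dict Int Int :=
  tuple_list.foldl (fun acc t =>
    let first : PySem.Dict Int Int := t.1.foldl (fun d cf =>
      if 0 ≤ cf.2 ∧ cf.2 < total_frame_num ∧ d.contains cf.2 = false then d.insert cf.2 cf.1 else d)
      PySem.Dict.empty
    let present := first.keys.foldl (fun p f => p.insert f (p.getD f 0 + 1)) acc.1
    let mismatch := t.2.foldl (fun m cf =>
      match first.get? cf.2 with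
      | some g => if cf.1 ≠ g then m.insert cf.2 (m.getD cf.2 0 + 1) else m
      | none => m) acc.2
    (present, mismatch)) (PySem.Dict.empty, PySem.Dict.empty)

def get_FIT_and_FIO_alt (total_frame_num : Int) (gt_idmap_tuple_list : List ((List (Int × Int)) × (List (Int × Int)))) (prediction_idmap_list : List ((List (Int × Int)) × (List (Int × Int)))) : List (Int × Int × Int) :=
  let gf := pvBucketCounts gt_idmap_tuple_list total_frame_num
  let pf := pvBucketCounts (prediction_idmap_list.map (fun t => (t.2, t.1))) total_frame_num
  (PySem.List.sorted gf.1.keys (fun x => x) false).map (fun f => (gf.2.getD f 0, pf.2.getD f 0, gf.1.getD f 0))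

-- ===== PRECONDITION & SPEC =====
def Spec_get_FIT_and_FIO (total_frame_num : Int) (gt_idmap_tuple_list : List ((List (Int × Int)) × (List (Int × Int)))) (prediction_idmap_list : List ((List (Int × Int)) × (List (Int × Int)))) (out : List (Int × Int × Int)) : Prop := out = get_FIT_and_FIO_alt total_frame_num gt_idmap_tuple_list prediction_idmap_list
instance (total_frame_num : Int) (gt_idmap_tuple_list : List ((List (Int × Int)) × (List (Int × Int)))) (prediction_idmap_list : List ((List (Int × Int)) × (List (Int × Int)))) (out : List (Int × Int × Int)) : Decidable (Spec_get_FIT_and_FIO total_frame_num gt_idmap_tuple_list prediction_idmap_list out) := by unfold Spec_get_FIT_and_FIO; infer_instance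

-- ===== CLAIM (what is proved, stated in full; the proofs are below) =====
def Claim_equal_get_FIT_and_FIO : Prop := ∀ (total_frame_num : Int) (gt_idmap_tuple_list : List ((List (Int × Int)) × (List (Int × Int)))) (prediction_idmap_list : List ((List (Int × Int)) × (List (Int × Int)))), Dom_get_FIT_and_FIO total_frame_num gt_idmap_tuple_list prediction_idmap_list → Spec_get_FIT_and_FIO total_frame_num gt_idmap_tuple_list prediction_idmap_list (get_FIT_and_FIO total_frame_num gt_idmap_tuple_list prediction_idmap_list)

-- ===== LEMMAS AND PROOFS =====

-- first gt cell id listed for frame f in a track (what A reads as curr_gt_cell[0])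
def pvFirstAt (f : Int) (track : List (Int × Int)) : Option Int :=
  ((track.filter (fun i => i.2 == f)).map (fun i => i.1)).head?

-- per-tuple contribution to gt_in (0/1) at frame f
def pvPresC (f : Int) (t : (List (Int × Int)) × (List (Int × Int))) : Int :=
  if (pvFirstAt f t.1).isSome then 1 else 0

-- per-tuple contribution to FIT/FIO at frame f
def pvMismC (f : Int) (t : (List (Int × Int)) × (List (Int × Int))) : Int :=
  match pvFirstAt f t.1 with
  | none => 0
  | some g => ((t.2.filter (fun i => i.2 == f && !(i.1 == g))).length : Int)

def pvPresS (f : Int) (L : List ((List (Int × Int)) × (List (Int × Int)))) : Int := (L.map (pvPresC f)).sum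
def pvMismS (f : Int) (L : List ((List (Int × Int)) × (List (Int × Int)))) : Int := (L.map (pvMismC f)).sum

theorem pvPresS_eq_countP (f : Int) (L : List ((List (Int × Int)) × (List (Int × Int)))) :
    pvPresS f L = (L.countP (fun t => (pvFirstAt f t.1).isSome) : Int) := by
  induction L with
  | nil => simp [pvPresS]
  | cons t L ih =>
    simp only [pvPresS, List.map_cons, List.sum_cons, List.countP_cons] at *
    rw [ih]
    by_cases h : (pvFirstAt f t.1).isSome
    · simp only [pvPresC, h, if_pos]; push_cast; ring
    · simp only [pvPresC, h, Bool.false_eq_true, if_false]; push_cast [h]; ring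

theorem pvPresS_pos_iff (f : Int) (L : List ((List (Int × Int)) × (List (Int × Int)))) :
    0 < pvPresS f L ↔ ∃ t ∈ L, (pvFirstAt f t.1).isSome := by
  rw [pvPresS_eq_countP]
  rw [show ((0 : Int) < (L.countP (fun t => (pvFirstAt f t.1).isSome) : Int)) ↔ 0 < L.countP (fun t => (pvFirstAt f t.1).isSome) by exact_mod_cast Iff.rfl]
  simp [List.countP_pos_iff]

-- ===== A-side characterisation =====

theorem pvA_count_fold (l : List Int) (h : Int) (F0 : Int) :
    l.foldl (fun FIT c => if ¬ (c = h) then FIT + 1 else FIT) F0 = F0 + (l.countP (fun c => !(c == h)) : Int) := by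
  induction l generalizing F0 with
  | nil => simp
  | cons c l ih =>
    rw [List.foldl_cons, ih, List.countP_cons]
    by_cases hc : c = h
    · simp [hc]
    · simp only [if_pos (show ¬ c = h from hc)]
      have : (!c == h) = true := by simp [hc]
      simp only [this, if_pos]
      push_cast
      ring

theorem pvA_tuple_count (f : Int) (t : (List (Int × Int)) × (List (Int × Int))) (g : Int)
    (hg : pvFirstAt f t.1 = some g) (F0 : Int) :
    ((t.2.filter (fun i => i.2 == f)).map (fun i => i.1)).foldl
      (fun FIT c => if ¬ (c = ((t.1.filter (fun i => i.2 == f)).map (fun i => i.1)).headI) then FIT + 1 else FIT) F0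
    = F0 + pvMismC f t := by
  have hhead : ((t.1.filter (fun i => i.2 == f)).map (fun i => i.1)).headI = g := by
    unfold pvFirstAt at hg
    cases hl : (t.1.filter (fun i => i.2 == f)).map (fun i => i.1) with
    | nil => rw [hl] at hg; simp at hg
    | cons a r =>
      rw [hl] at hg
      simp only [List.head?_cons, Option.some.injEq] at hg
      simp [hg]
  rw [hhead, pvA_count_fold]
  congr 1
  unfold pvMismC
  rw [hg]
  rw [List.countP_map]
  congr 1
  rw [← List.countP_eq_length_filter, List.countP_filter]
  apply List.countP_congr
  intro a _
  simp only [Function.comp_apply, Bool.and_comm]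

theorem pvA_gt_fold (f : Int) (L : List ((List (Int × Int)) × (List (Int × Int)))) (acc0 : Int × Int) :
    L.foldl (fun (acc : Int × Int) (t : (List (Int × Int)) × (List (Int × Int))) =>
      let curr_gt_cell := (t.1.filter (fun i => i.2 == f)).map (fun i => i.1)
      if curr_gt_cell ≠ [] then
        let gt_in_frame := acc.1 + 1
        let curr_est_cells := (t.2.filter (fun i => i.2 == f)).map (fun i => i.1)
        if curr_est_cells ≠ [] then
          (gt_in_frame, curr_est_cells.foldl (fun FIT c => if ¬ (c = curr_gt_cell.headI) then FIT + 1 else FIT) acc.2)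
        else (gt_in_frame, acc.2)
      else acc) acc0
    = (acc0.1 + pvPresS f L, acc0.2 + pvMismS f L) := by
  induction L generalizing acc0 with
  | nil => simp [pvPresS, pvMismS]
  | cons t L ih =>
    rw [List.foldl_cons, ih]
    have hsum1 : pvPresS f (t :: L) = pvPresC f t + pvPresS f L := by
      simp [pvPresS]
    have hsum2 : pvMismS f (t :: L) = pvMismC f t + pvMismS f L := by
      simp [pvMismS]
    rw [hsum1, hsum2]
    cases hg : pvFirstAt f t.1 with
    | none =>
      have hnil : (t.1.filter (fun i => i.2 == f)).map (fun i => i.1) = [] := by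
        unfold pvFirstAt at hg; exact List.head?_eq_none_iff.mp hg
      have h1 : pvPresC f t = 0 := by simp [pvPresC, hg]
      have h2 : pvMismC f t = 0 := by simp [pvMismC, hg]
      simp only [hnil, ne_eq, not_true_eq_false, if_false, h1, h2]
      simp only [Prod.mk.injEq]
      constructor <;> ring
    | some g =>
      have hne : (t.1.filter (fun i => i.2 == f)).map (fun i => i.1) ≠ [] := by
        intro h; unfold pvFirstAt at hg; rw [h] at hg; simp at hg
      have h1 : pvPresC f t = 1 := by simp [pvPresC, hg]
      simp only [ne_eq, hne, not_false_iff, if_pos, h1]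
      by_cases hest : (t.2.filter (fun i => i.2 == f)).map (fun i => i.1) = []
      · have h2 : pvMismC f t = 0 := by
          have hfil : t.2.filter (fun i => i.2 == f) = [] := by
            cases hh : t.2.filter (fun i => i.2 == f) with
            | nil => rfl
            | cons a r => rw [hh] at hest; simp at hest
          have hsub : t.2.filter (fun i => i.2 == f && !(i.1 == g)) = [] := by
            rw [List.filter_eq_nil_iff] at hfil ⊢
            intro a ha hcon
            exact hfil a ha ((Bool.and_eq_true _ _).mp hcon).1
          simp [pvMismC, hg, hsub]
        simp only [hest, ne_eq, not_true_eq_false, if_false, h2, Prod.mk.injEq]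
        constructor <;> ring
      · simp only [ne_eq, hest, not_false_iff, if_pos]
        rw [pvA_tuple_count f t g hg]
        simp only [Prod.mk.injEq]
        constructor <;> ring

theorem pvA_fio_fold (f : Int) (L : List ((List (Int × Int)) × (List (Int × Int)))) (F0 : Int) :
    L.foldl (fun (FIO : Int) (t : (List (Int × Int)) × (List (Int × Int))) =>
      let curr_est_cells := (t.1.filter (fun i => i.2 == f)).map (fun i => i.1)
      let curr_gt_cell := (t.2.filter (fun i => i.2 == f)).map (fun i => i.1)
      if curr_gt_cell ≠ [] then
        if curr_est_cells ≠ [] then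
          curr_est_cells.foldl (fun FIO c => if ¬ (c = curr_gt_cell.headI) then FIO + 1 else FIO) FIO
        else FIO
      else FIO) F0
    = F0 + pvMismS f (L.map (fun t => (t.2, t.1))) := by
  induction L generalizing F0 with
  | nil => simp [pvMismS]
  | cons t L ih =>
    rw [List.foldl_cons, ih]
    have hsum : pvMismS f ((t :: L).map (fun t => (t.2, t.1)))
        = pvMismC f (t.2, t.1) + pvMismS f (L.map (fun t => (t.2, t.1))) := by
      simp [pvMismS]
    rw [hsum]
    cases hg : pvFirstAt f t.2 with
    | none =>
      have hnil : (t.2.filter (fun i => i.2 == f)).map (fun i => i.1) = [] := by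
        unfold pvFirstAt at hg; exact List.head?_eq_none_iff.mp hg
      have h2 : pvMismC f (t.2, t.1) = 0 := by simp [pvMismC, hg]
      simp only [hnil, ne_eq, not_true_eq_false, if_false, h2]
      ring
    | some g =>
      have hne : (t.2.filter (fun i => i.2 == f)).map (fun i => i.1) ≠ [] := by
        intro h; unfold pvFirstAt at hg; rw [h] at hg; simp at hg
      simp only [ne_eq, hne, not_false_iff, if_pos]
      by_cases hest : (t.1.filter (fun i => i.2 == f)).map (fun i => i.1) = []
      · have h2 : pvMismC f (t.2, t.1) = 0 := by
          have hfil : t.1.filter (fun i => i.2 == f) = [] := by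
            cases hh : t.1.filter (fun i => i.2 == f) with
            | nil => rfl
            | cons a r => rw [hh] at hest; simp at hest
          have hsub : t.1.filter (fun i => i.2 == f && !(i.1 == g)) = [] := by
            rw [List.filter_eq_nil_iff] at hfil ⊢
            intro a ha hcon
            exact hfil a ha ((Bool.and_eq_true _ _).mp hcon).1
          simp [pvMismC, hg, hsub]
        simp only [hest, ne_eq, not_true_eq_false, if_false, h2]
        ring
      · simp only [ne_eq, hest, not_false_iff, if_pos]
        have := pvA_tuple_count f (t.2, t.1) g hg F0
        simp only at this
        rw [this]
        ring

theorem pvA_eq (N : Int) (gt pred : List ((List (Int × Int)) × (List (Int × Int)))) :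
    get_FIT_and_FIO N gt pred
    = ((PySem.List.pyRange 0 N 1).filter (fun f => decide (0 < pvPresS f gt))).map
        (fun f => (pvMismS f gt, pvMismS f (pred.map (fun t => (t.2, t.1))), pvPresS f gt)) := by
  unfold get_FIT_and_FIO
  rw [PySem.List.foldl_congr_mem'
    (g := fun acc f => if 0 < pvPresS f gt then
      acc ++ [(pvMismS f gt, pvMismS f (pred.map (fun t => (t.2, t.1))), pvPresS f gt)] else acc)]
  · rw [PySem.List.foldl_append_ite]
    simp
  · intro x _ acc
    simp only [pvA_gt_fold, pvA_fio_fold]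
    simp [gt_iff_lt]

-- ===== B-side characterisation =====

theorem pvFirstDict_get? (N : Int) (track : List (Int × Int)) (d : PySem.Dict Int Int) (f : Int) :
    (track.foldl (fun d cf =>
      if 0 ≤ cf.2 ∧ cf.2 < N ∧ d.contains cf.2 = false then d.insert cf.2 cf.1 else d) d).get? f
    = match d.get? f with
      | some v => some v
      | none => if 0 ≤ f ∧ f < N then pvFirstAt f track else none := by
  induction track generalizing d with
  | nil =>
    cases hd : d.get? f with
    | some v => simp [hd]
    | none => simp [hd, pvFirstAt]
  | cons cf tl ih =>
    rw [List.foldl_cons, ih]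
    by_cases hcond : 0 ≤ cf.2 ∧ cf.2 < N ∧ d.contains cf.2 = false
    · rw [if_pos hcond]
      by_cases hf : f = cf.2
      · rw [hf]
        rw [PySem.Dict.get?_insert_self]
        have hnone : d.get? cf.2 = none := by
          rw [PySem.Dict.contains_eq_isSome_get?] at hcond
          cases h : d.get? cf.2 with
          | none => rfl
          | some v => rw [h] at hcond; simp at hcond
        rw [hnone]
        have hr : (0 ≤ cf.2 ∧ cf.2 < N) := ⟨hcond.1, hcond.2.1⟩
        simp [pvFirstAt, hr]
      · rw [PySem.Dict.get?_insert_of_ne _ _ hf]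
        have heq : pvFirstAt f (cf :: tl) = pvFirstAt f tl := by
          have : (cf.2 == f) = false := by
            simp only [beq_eq_false_iff_ne, ne_eq]
            intro h; exact hf h.symm
          simp [pvFirstAt, List.filter_cons, this]
        rw [heq]
    · rw [if_neg hcond]
      cases hdf : d.get? f with
      | some v => simp [hdf]
      | none =>
        simp only [hdf]
        by_cases hr : 0 ≤ f ∧ f < N
        · rw [if_pos hr, if_pos hr]
          by_cases hf : cf.2 = f
          · exfalso
            apply hcond
            rw [hf]
            refine ⟨hr.1, hr.2, ?_⟩
            rw [PySem.Dict.contains_eq_isSome_get?, hdf]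
            rfl
          · have : (cf.2 == f) = false := beq_eq_false_iff_ne.mpr hf
            simp [pvFirstAt, List.filter_cons, this]
        · rw [if_neg hr, if_neg hr]

theorem pvFirstDict_get?_empty (N : Int) (track : List (Int × Int)) (f : Int) :
    (track.foldl (fun d cf =>
      if 0 ≤ cf.2 ∧ cf.2 < N ∧ d.contains cf.2 = false then d.insert cf.2 cf.1 else d) PySem.Dict.empty).get? f
    = if 0 ≤ f ∧ f < N then pvFirstAt f track else none := by
  rw [pvFirstDict_get?]
  simp [PySem.Dict.get?_empty]

theorem pvFirstDict_nodup (N : Int) (track : List (Int × Int)) (d : PySem.Dict Int Int) (hd : d.keys.Nodup) :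
    (track.foldl (fun d cf =>
      if 0 ≤ cf.2 ∧ cf.2 < N ∧ d.contains cf.2 = false then d.insert cf.2 cf.1 else d) d).keys.Nodup := by
  induction track generalizing d with
  | nil => exact hd
  | cons cf tl ih =>
    rw [List.foldl_cons]
    apply ih
    by_cases hcond : 0 ≤ cf.2 ∧ cf.2 < N ∧ d.contains cf.2 = false
    · rw [if_pos hcond]; exact PySem.Dict.nodup_keys_insert _ _ _ hd
    · rw [if_neg hcond]; exact hd

theorem pvBucket_present_getD (N : Int) (L : List ((List (Int × Int)) × (List (Int × Int))))
    (acc0 : PySem.Dict Int Int × PySem.Dict Int Int) (f : Int) :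
    ((L.foldl (fun acc t =>
      let first : PySem.Dict Int Int := t.1.foldl (fun d cf =>
        if 0 ≤ cf.2 ∧ cf.2 < N ∧ d.contains cf.2 = false then d.insert cf.2 cf.1 else d)
        PySem.Dict.empty
      let present := first.keys.foldl (fun p f => p.insert f (p.getD f 0 + 1)) acc.1
      let mismatch := t.2.foldl (fun m cf =>
        match first.get? cf.2 with
        | some g => if cf.1 ≠ g then m.insert cf.2 (m.getD cf.2 0 + 1) else m
        | none => m) acc.2
      (present, mismatch)) acc0).1).getD f 0
    = acc0.1.getD f 0 + (L.map (fun t => if 0 ≤ f ∧ f < N then pvPresC f t else 0)).sum := by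
  induction L generalizing acc0 with
  | nil => simp
  | cons t L ih =>
    rw [List.foldl_cons, ih]
    dsimp only
    rw [PySem.Dict.getD_foldl_insert_add_one]
    have hnodup : (t.1.foldl (fun d cf =>
        if 0 ≤ cf.2 ∧ cf.2 < N ∧ d.contains cf.2 = false then d.insert cf.2 cf.1 else d)
        PySem.Dict.empty).keys.Nodup := pvFirstDict_nodup N t.1 _ PySem.Dict.nodup_keys_empty
    have hcnt : ((t.1.foldl (fun d cf =>
        if 0 ≤ cf.2 ∧ cf.2 < N ∧ d.contains cf.2 = false then d.insert cf.2 cf.1 else d)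
        PySem.Dict.empty).keys.count f : Int) = if 0 ≤ f ∧ f < N then pvPresC f t else 0 := by
      by_cases hmem : f ∈ (t.1.foldl (fun d cf =>
          if 0 ≤ cf.2 ∧ cf.2 < N ∧ d.contains cf.2 = false then d.insert cf.2 cf.1 else d)
          PySem.Dict.empty).keys
      · rw [List.count_eq_one_of_mem hnodup hmem]
        have this : ¬ ((t.1.foldl (fun d cf =>
            if 0 ≤ cf.2 ∧ cf.2 < N ∧ d.contains cf.2 = false then d.insert cf.2 cf.1 else d)
            PySem.Dict.empty).get? f = none) :=
          fun hc => (PySem.Dict.get?_eq_none_iff_not_mem_keys _ f).mp hc hmem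
        rw [pvFirstDict_get?_empty] at this
        by_cases hr : 0 ≤ f ∧ f < N
        · rw [if_pos hr] at this
          simp only [if_pos hr, pvPresC]
          cases hF : pvFirstAt f t.1 with
          | none => exact absurd hF this
          | some g => simp
        · rw [if_neg hr] at this; exact absurd rfl this
      · rw [List.count_eq_zero_of_not_mem hmem]
        have this := (PySem.Dict.get?_eq_none_iff_not_mem_keys _ f).mpr hmem
        rw [pvFirstDict_get?_empty] at this
        by_cases hr : 0 ≤ f ∧ f < N
        · rw [if_pos hr] at this
          simp only [if_pos hr, pvPresC, this]
          simp
        · simp [hr]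
    rw [hcnt]
    simp only [List.map_cons, List.sum_cons]
    ring

theorem pvBucket_present_keys_mem (N : Int) (L : List ((List (Int × Int)) × (List (Int × Int))))
    (acc0 : PySem.Dict Int Int × PySem.Dict Int Int) (f : Int) :
    (f ∈ ((L.foldl (fun acc t =>
      let first : PySem.Dict Int Int := t.1.foldl (fun d cf =>
        if 0 ≤ cf.2 ∧ cf.2 < N ∧ d.contains cf.2 = false then d.insert cf.2 cf.1 else d)
        PySem.Dict.empty
      let present := first.keys.foldl (fun p f => p.insert f (p.getD f 0 + 1)) acc.1
      let mismatch := t.2.foldl (fun m cf =>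
        match first.get? cf.2 with
        | some g => if cf.1 ≠ g then m.insert cf.2 (m.getD cf.2 0 + 1) else m
        | none => m) acc.2
      (present, mismatch)) acc0).1).keys)
    ↔ (f ∈ acc0.1.keys ∨ (0 ≤ f ∧ f < N ∧ ∃ t ∈ L, (pvFirstAt f t.1).isSome)) := by
  induction L generalizing acc0 with
  | nil => simp
  | cons t L ih =>
    rw [List.foldl_cons, ih]
    dsimp only
    rw [PySem.Dict.keys_foldl_insert]
    have hfirstmem : (f ∈ PySem.Set.update acc0.1.keys (t.1.foldl (fun d cf =>
        if 0 ≤ cf.2 ∧ cf.2 < N ∧ d.contains cf.2 = false then d.insert cf.2 cf.1 else d)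
        PySem.Dict.empty).keys)
        ↔ (f ∈ acc0.1.keys ∨ (0 ≤ f ∧ f < N ∧ (pvFirstAt f t.1).isSome)) := by
      rw [PySem.Set.mem_update]
      constructor
      · rintro (h | h)
        · exact Or.inl h
        · right
          have this : ¬ ((t.1.foldl (fun d cf =>
              if 0 ≤ cf.2 ∧ cf.2 < N ∧ d.contains cf.2 = false then d.insert cf.2 cf.1 else d)
              PySem.Dict.empty).get? f = none) :=
            fun hc => (PySem.Dict.get?_eq_none_iff_not_mem_keys _ f).mp hc h
          rw [pvFirstDict_get?_empty] at this
          by_cases hr : 0 ≤ f ∧ f < N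
          · rw [if_pos hr] at this
            refine ⟨hr.1, hr.2, ?_⟩
            cases hF : pvFirstAt f t.1 with
            | none => exact absurd hF this
            | some g => simp
          · rw [if_neg hr] at this; exact absurd rfl this
      · rintro (h | ⟨h1, h2, h3⟩)
        · exact Or.inl h
        · right
          by_contra hmemk
          have hnone := (PySem.Dict.get?_eq_none_iff_not_mem_keys _ f).mpr hmemk
          rw [pvFirstDict_get?_empty, if_pos ⟨h1, h2⟩] at hnone
          rw [hnone] at h3
          simp at h3
    constructor
    · rintro (h | ⟨h1, h2, xt, hxt, hx⟩)
      · rcases hfirstmem.mp h with h' | ⟨h1, h2, h3⟩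
        · exact Or.inl h'
        · exact Or.inr ⟨h1, h2, t, List.mem_cons_self, h3⟩
      · exact Or.inr ⟨h1, h2, xt, List.mem_cons_of_mem _ hxt, hx⟩
    · rintro (h | ⟨h1, h2, xt, hxt, hx⟩)
      · exact Or.inl (hfirstmem.mpr (Or.inl h))
      · rcases List.mem_cons.mp hxt with rfl | hxt'
        · exact Or.inl (hfirstmem.mpr (Or.inr ⟨h1, h2, hx⟩))
        · exact Or.inr ⟨h1, h2, xt, hxt', hx⟩

theorem pvBucket_present_keys_nodup (N : Int) (L : List ((List (Int × Int)) × (List (Int × Int))))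
    (acc0 : PySem.Dict Int Int × PySem.Dict Int Int) (hp : acc0.1.keys.Nodup) :
    ((L.foldl (fun acc t =>
      let first : PySem.Dict Int Int := t.1.foldl (fun d cf =>
        if 0 ≤ cf.2 ∧ cf.2 < N ∧ d.contains cf.2 = false then d.insert cf.2 cf.1 else d)
        PySem.Dict.empty
      let present := first.keys.foldl (fun p f => p.insert f (p.getD f 0 + 1)) acc.1
      let mismatch := t.2.foldl (fun m cf =>
        match first.get? cf.2 with
        | some g => if cf.1 ≠ g then m.insert cf.2 (m.getD cf.2 0 + 1) else m
        | none => m) acc.2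
      (present, mismatch)) acc0).1).keys.Nodup := by
  induction L generalizing acc0 with
  | nil => exact hp
  | cons t L ih =>
    rw [List.foldl_cons]
    apply ih
    dsimp only
    exact PySem.Dict.nodup_keys_foldl_insert _ _ _ hp

theorem pvMism_tuple_fold (firstd : PySem.Dict Int Int) (l : List (Int × Int)) (m0 : PySem.Dict Int Int) (f : Int) :
    (l.foldl (fun m cf =>
      match firstd.get? cf.2 with
      | some g => if cf.1 ≠ g then m.insert cf.2 (m.getD cf.2 0 + 1) else m
      | none => m) m0).getD f 0
    = m0.getD f 0 + ((l.filter (fun i => i.2 == f &&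
        (match firstd.get? f with
         | some g => !(i.1 == g)
         | none => false))).length : Int) := by
  induction l generalizing m0 with
  | nil => simp
  | cons i l ih =>
    rw [List.foldl_cons, ih]
    by_cases hif : i.2 = f
    · cases hgf : firstd.get? f with
      | none =>
        have hgi : firstd.get? i.2 = none := by rw [hif, hgf]
        simp only [hgi, List.filter_cons, hif, hgf]
        simp
      | some g =>
        have hgi : firstd.get? i.2 = some g := by rw [hif, hgf]
        by_cases hval : i.1 = g
        · simp only [hgi, hval, ne_eq, not_true_eq_false, if_false, List.filter_cons, hif, hgf]
          simp
        · have hstep : (match firstd.get? i.2 with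
              | some g => if i.1 ≠ g then m0.insert i.2 (m0.getD i.2 0 + 1) else m0
              | none => m0) = m0.insert f (m0.getD f 0 + 1) := by
            rw [hif, hgf]
            simp [hval]
          rw [hstep, PySem.Dict.getD_insert_self]
          have h1 : (i.2 == f) = true := by simp [hif]
          have h2 : (!(i.1 == g)) = true := by simp [hval]
          simp [List.filter_cons, h1, h2]
          push_cast
          ring
    · have hne : (i.2 == f) = false := beq_eq_false_iff_ne.mpr hif
      cases hgf : firstd.get? i.2 with
      | none =>
        simp only [hgf, List.filter_cons, hne]
        simp
      | some g =>
        by_cases hval : i.1 = g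
        · simp only [hgf, hval, ne_eq, not_true_eq_false, if_false, List.filter_cons, hne]
          simp
        · simp only [hgf, ne_eq, hval, not_false_iff, if_pos, List.filter_cons, hne]
          rw [PySem.Dict.getD_insert_of_ne]
          · simp
          · intro h; exact hif h.symm

theorem pvBucket_mism_getD (N : Int) (L : List ((List (Int × Int)) × (List (Int × Int))))
    (acc0 : PySem.Dict Int Int × PySem.Dict Int Int) (f : Int) (hf : 0 ≤ f ∧ f < N) :
    ((L.foldl (fun acc t =>
      let first : PySem.Dict Int Int := t.1.foldl (fun d cf =>
        if 0 ≤ cf.2 ∧ cf.2 < N ∧ d.contains cf.2 = false then d.insert cf.2 cf.1 else d)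
        PySem.Dict.empty
      let present := first.keys.foldl (fun p f => p.insert f (p.getD f 0 + 1)) acc.1
      let mismatch := t.2.foldl (fun m cf =>
        match first.get? cf.2 with
        | some g => if cf.1 ≠ g then m.insert cf.2 (m.getD cf.2 0 + 1) else m
        | none => m) acc.2
      (present, mismatch)) acc0).2).getD f 0
    = acc0.2.getD f 0 + pvMismS f L := by
  induction L generalizing acc0 with
  | nil => simp [pvMismS]
  | cons t L ih =>
    rw [List.foldl_cons, ih]
    dsimp only
    rw [pvMism_tuple_fold]
    have hfd : (t.1.foldl (fun d cf =>
        if 0 ≤ cf.2 ∧ cf.2 < N ∧ d.contains cf.2 = false then d.insert cf.2 cf.1 else d)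
        PySem.Dict.empty).get? f = pvFirstAt f t.1 := by
      rw [pvFirstDict_get?_empty, if_pos hf]
    rw [hfd]
    have hm : ((t.2.filter (fun i => i.2 == f &&
        (match pvFirstAt f t.1 with
         | some g => !(i.1 == g)
         | none => false))).length : Int) = pvMismC f t := by
      cases hF : pvFirstAt f t.1 with
      | none => simp [pvMismC, hF]
      | some g => simp [pvMismC, hF]
    rw [hm]
    have hsum : pvMismS f (t :: L) = pvMismC f t + pvMismS f L := by simp [pvMismS]
    rw [hsum]
    ring

theorem pvBC_present_getD (N : Int) (L : List ((List (Int × Int)) × (List (Int × Int)))) (f : Int) :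
    (pvBucketCounts L N).1.getD f 0
    = (PySem.Dict.empty : PySem.Dict Int Int).getD f 0
      + (L.map (fun t => if 0 ≤ f ∧ f < N then pvPresC f t else 0)).sum :=
  pvBucket_present_getD N L (PySem.Dict.empty, PySem.Dict.empty) f

theorem pvBC_present_keys_mem (N : Int) (L : List ((List (Int × Int)) × (List (Int × Int)))) (f : Int) :
    (f ∈ (pvBucketCounts L N).1.keys)
    ↔ (f ∈ (PySem.Dict.empty : PySem.Dict Int Int).keys ∨ (0 ≤ f ∧ f < N ∧ ∃ t ∈ L, (pvFirstAt f t.1).isSome)) :=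
  pvBucket_present_keys_mem N L (PySem.Dict.empty, PySem.Dict.empty) f

theorem pvBC_present_keys_nodup (N : Int) (L : List ((List (Int × Int)) × (List (Int × Int)))) :
    (pvBucketCounts L N).1.keys.Nodup :=
  pvBucket_present_keys_nodup N L (PySem.Dict.empty, PySem.Dict.empty) PySem.Dict.nodup_keys_empty

theorem pvBC_mism_getD (N : Int) (L : List ((List (Int × Int)) × (List (Int × Int)))) (f : Int)
    (hf : 0 ≤ f ∧ f < N) :
    (pvBucketCounts L N).2.getD f 0
    = (PySem.Dict.empty : PySem.Dict Int Int).getD f 0 + pvMismS f L :=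
  pvBucket_mism_getD N L (PySem.Dict.empty, PySem.Dict.empty) f hf

theorem pvB_eq (N : Int) (gt pred : List ((List (Int × Int)) × (List (Int × Int)))) :
    get_FIT_and_FIO_alt N gt pred
    = ((PySem.List.pyRange 0 N 1).filter (fun f => decide (0 < pvPresS f gt))).map
        (fun f => (pvMismS f gt, pvMismS f (pred.map (fun t => (t.2, t.1))), pvPresS f gt)) := by
  show (PySem.List.sorted (pvBucketCounts gt N).1.keys (fun x => x) false).map
      (fun f => ((pvBucketCounts gt N).2.getD f 0,
        (pvBucketCounts (pred.map (fun t => (t.2, t.1))) N).2.getD f 0,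
        (pvBucketCounts gt N).1.getD f 0)) = _
  have hpair : ((PySem.List.pyRange 0 N 1).filter (fun f => decide (0 < pvPresS f gt))).Pairwise (· < ·) :=
    (PySem.List.pairwise_lt_pyRange_one 0 N).filter _
  have hnd1 : ((PySem.List.pyRange 0 N 1).filter (fun f => decide (0 < pvPresS f gt))).Nodup :=
    hpair.imp (fun h => ne_of_lt h)
  have hnd2 : (pvBucketCounts gt N).1.keys.Nodup := pvBC_present_keys_nodup N gt
  have hmem : ∀ a, (a ∈ (PySem.List.pyRange 0 N 1).filter (fun f => decide (0 < pvPresS f gt)))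
      ↔ a ∈ (pvBucketCounts gt N).1.keys := by
    intro a
    rw [List.mem_filter, PySem.List.mem_pyRange_one, pvBC_present_keys_mem]
    simp only [PySem.Dict.keys_empty, List.not_mem_nil, false_or, decide_eq_true_eq]
    rw [pvPresS_pos_iff]
    constructor
    · rintro ⟨⟨h1, h2⟩, h3⟩; exact ⟨h1, h2, h3⟩
    · rintro ⟨h1, h2, h3⟩; exact ⟨⟨h1, h2⟩, h3⟩
  have hperm : ((PySem.List.pyRange 0 N 1).filter (fun f => decide (0 < pvPresS f gt))).Perm
      (pvBucketCounts gt N).1.keys := (List.perm_ext_iff_of_nodup hnd1 hnd2).mpr hmem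
  rw [PySem.List.sorted_eq_of_perm_of_pairwise_lt _ _ _ hperm hpair]
  apply List.map_congr_left
  intro f hf
  rw [List.mem_filter, PySem.List.mem_pyRange_one] at hf
  obtain ⟨⟨h1, h2⟩, _⟩ := hf
  rw [pvBC_mism_getD N gt f ⟨h1, h2⟩, pvBC_mism_getD N (pred.map (fun t => (t.2, t.1))) f ⟨h1, h2⟩,
    pvBC_present_getD]
  simp only [PySem.Dict.getD_empty, zero_add, if_pos (And.intro h1 h2)]
  rfl

-- ===== VERDICT (by name: the statement is the Claim_ definition above) =====
theorem get_FIT_and_FIO_spec : Claim_equal_get_FIT_and_FIO := by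
  intro N gt pred _
  unfold Spec_get_FIT_and_FIO
  rw [pvA_eq, pvB_eq]
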